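-- pv_equiv track=rewrite | github.com/XuXinran1011/OpenTruss | backend/app/services/lot_strategy.py | _group_elements_by_rule
-- ===== SOURCE A (Python) =====
-- from typing import List, Dict, Any, Optional, Literal
-- from enum import Enum
--
-- class RuleType(str, Enum):
--     """检验批划分规则类型"""
--     BY_LEVEL = "BY_LEVEL"  # 按楼层划分
--     BY_ZONE = "BY_ZONE"  # 按区域划分
--     BY_LEVEL_AND_ZONE = "BY_LEVEL_AND_ZONE"  # 按楼层和区域组合划分
--
-- def _group_elements_by_rule(
--
--     elements: List[Dict[str, Any]],
--     rule_type: RuleType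
-- ) -> Dict[str, List[str]]:
--     """根据规则类型分组构件
--
--     Args:
--         elements: 构件列表
--         rule_type: 规则类型
--
--     Returns:
--         Dict: 分组键 -> 构件ID列表的映射
--     """
--     grouped = {}
--
--     for elem in elements:
--         element_id = elem["element_id"]
--         level_id = elem.get("level_id") or ""
--         zone_id = elem.get("zone_id") or ""
--
--         if rule_type == RuleType.BY_LEVEL:
--             group_key = f"level:{level_id}" if level_id else "level:unknown"
--         elif rule_type == RuleType.BY_ZONE:
--             group_key = f"zone:{zone_id}" if zone_id else "zone:unknown"
--         elif rule_type == RuleType.BY_LEVEL_AND_ZONE: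
--             group_key = f"level:{level_id}_zone:{zone_id}" if (level_id and zone_id) else "unknown"
--         else:
--             group_key = "default"
--
--         if group_key not in grouped:
--             grouped[group_key] = []
--         grouped[group_key].append(element_id)
--
--     return grouped
-- ===== SOURCE B (Python) =====
-- def _group_elements_by_rule(elements, rule_type):
--     """Alternative decomposition: derive each element's group key in one mapping
--     pass, then build the result as a comprehension over the first-occurrence
--     distinct keys, collecting ids per key by filtering the (key, id) pairs."""
--     def key_of(elem):
--         level_id = elem.get("level_id") or ""
--         zone_id = elem.get("zone_id") or ""
--         if rule_type == "BY_LEVEL":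
--             return f"level:{level_id}" if level_id else "level:unknown"
--         if rule_type == "BY_ZONE":
--             return f"zone:{zone_id}" if zone_id else "zone:unknown"
--         if rule_type == "BY_LEVEL_AND_ZONE":
--             return f"level:{level_id}_zone:{zone_id}" if (level_id and zone_id) else "unknown"
--         return "default"
--
--     pairs = [(key_of(e), e["element_id"]) for e in elements]
--     keys = list(dict.fromkeys(k for k, _ in pairs))
--     return {k: [eid for k2, eid in pairs if k2 == k] for k in keys}
-- ===== Notes on version B (the rewrite author's own statement) =====
-- stated objective: alternative
-- what changed: Replaces the incremental dict-building loop (membership test, insert-empty, append) by a map/dedup/filter pipeline: compute all (group_key, element_id) pairs, dedup the keys in first-occurrence order, and build each group by filtering the pairs per key.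
-- outside the precondition, e.g. on _group_elements_by_rule([{'level_id': '1'}], 'BY_LEVEL'): A raises KeyError, B raises KeyError
import Mathlib
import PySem

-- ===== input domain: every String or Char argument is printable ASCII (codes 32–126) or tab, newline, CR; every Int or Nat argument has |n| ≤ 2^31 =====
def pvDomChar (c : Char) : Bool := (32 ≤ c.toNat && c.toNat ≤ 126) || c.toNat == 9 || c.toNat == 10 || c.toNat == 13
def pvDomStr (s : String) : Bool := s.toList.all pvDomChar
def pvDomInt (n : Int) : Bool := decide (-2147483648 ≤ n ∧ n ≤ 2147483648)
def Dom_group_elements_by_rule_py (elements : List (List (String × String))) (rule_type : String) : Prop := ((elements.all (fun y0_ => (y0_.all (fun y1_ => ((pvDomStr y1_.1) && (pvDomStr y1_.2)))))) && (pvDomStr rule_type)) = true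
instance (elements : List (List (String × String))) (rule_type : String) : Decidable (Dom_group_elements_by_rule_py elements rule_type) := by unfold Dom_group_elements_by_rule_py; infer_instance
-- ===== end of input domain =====

-- B builds the grouping by a map/dedup/filter pipeline instead of A's incremental dict loop (objective: alternative, same result).

-- elem.get(k): first-match lookup in the association list (per the dict convention)
def pvLookup (e : List (String × String)) (k : String) : Option String :=
  (e.find? (fun p => p.1 == k)).map Prod.snd

-- ===== PORT A =====
def group_elements_by_rule_py (elements : List (List (String × String))) (rule_type : String) : List (String × List String) :=
  (elements.foldl (fun grouped elem =>
    -- element_id = elem["element_id"]; KeyError (lookup = none) is excluded by Pre_, so getD "" is never taken there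
    let element_id := (pvLookup elem "element_id").getD ""
    let level_id := (pvLookup elem "level_id").getD ""
    let zone_id := (pvLookup elem "zone_id").getD ""
    let group_key :=
      if rule_type == "BY_LEVEL" then
        (if level_id == "" then "level:unknown" else "level:" ++ level_id)
      else if rule_type == "BY_ZONE" then
        (if zone_id == "" then "zone:unknown" else "zone:" ++ zone_id)
      else if rule_type == "BY_LEVEL_AND_ZONE" then
        (if level_id == "" || zone_id == "" then "unknown" else "level:" ++ level_id ++ "_zone:" ++ zone_id)
      else "default"
    let g := if grouped.contains group_key then grouped else grouped.insert group_key []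
    g.modify group_key [] (fun l => l ++ [element_id])
  ) PySem.Dict.empty).items

-- ===== PORT B =====
def pvKeyOf (rule_type : String) (elem : List (String × String)) : String :=
  let level_id := (pvLookup elem "level_id").getD ""
  let zone_id := (pvLookup elem "zone_id").getD ""
  if rule_type == "BY_LEVEL" then
    (if level_id == "" then "level:unknown" else "level:" ++ level_id)
  else if rule_type == "BY_ZONE" then
    (if zone_id == "" then "zone:unknown" else "zone:" ++ zone_id)
  else if rule_type == "BY_LEVEL_AND_ZONE" then
    (if level_id == "" || zone_id == "" then "unknown" else "level:" ++ level_id ++ "_zone:" ++ zone_id)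
  else "default"

def group_elements_by_rule_py_alt (elements : List (List (String × String))) (rule_type : String) : List (String × List String) :=
  let pairs := elements.map (fun e => (pvKeyOf rule_type e, (pvLookup e "element_id").getD ""))
  let keys := PySem.List.dedup (pairs.map Prod.fst)
  keys.map (fun k => (k, (pairs.filter (fun p => p.1 == k)).map Prod.snd))

-- ===== PRECONDITION & SPEC =====
-- Pre_ excludes exactly the elements missing the "element_id" key, on which A raises KeyError.
def Pre_group_elements_by_rule_py (elements : List (List (String × String))) (_rule_type : String) : Prop :=
  elements.all (fun e => (e.find? (fun p => p.1 == "element_id")).isSome) = true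
instance (elements : List (List (String × String))) (rule_type : String) : Decidable (Pre_group_elements_by_rule_py elements rule_type) := by unfold Pre_group_elements_by_rule_py; infer_instance
def pvWitness_group_elements_by_rule_py : (List (List (String × String))) × String :=
  ([[("element_id", "e1"), ("level_id", "L1")], [("element_id", "e2")]], "BY_LEVEL")

def Spec_group_elements_by_rule_py (elements : List (List (String × String))) (rule_type : String) (out : List (String × List String)) : Prop := out = group_elements_by_rule_py_alt elements rule_type
instance (elements : List (List (String × String))) (rule_type : String) (out : List (String × List String)) : Decidable (Spec_group_elements_by_rule_py elements rule_type out) := by unfold Spec_group_elements_by_rule_py; infer_instance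

-- ===== CLAIM (what is proved, stated in full; the proofs are below) =====
def Claim_equal_group_elements_by_rule_py : Prop := ∀ (elements : List (List (String × String))) (rule_type : String), Dom_group_elements_by_rule_py elements rule_type → Pre_group_elements_by_rule_py elements rule_type → Spec_group_elements_by_rule_py elements rule_type (group_elements_by_rule_py elements rule_type)

-- ===== LEMMAS AND PROOFS =====

theorem pv_step_eq (d : PySem.Dict String (List String)) (k i : String) :
    ((if d.contains k then d else d.insert k []).modify k [] (fun l => l ++ [i]))
      = d.modify k [] (fun l => l ++ [i]) := by
  by_cases h : d.contains k
  · simp [h]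
  · have hk : ∀ p ∈ d.items, ¬ (p.1 = k) := by
      intro p hp hpk
      exact h ((PySem.Dict.contains_iff_mem_keys d k).mpr (hpk ▸ PySem.Dict.mem_keys_of_mem_items d hp))
    have hfind : d.items.find? (fun p => p.1 == k) = none := by
      rw [List.find?_eq_none]
      intro p hp; simpa using hk p hp
    simp only [h, Bool.false_eq_true, if_false]
    simp [PySem.Dict.modify, PySem.Dict.insert, PySem.Dict.getD, PySem.Dict.get?, h,
      List.find?_append, hfind, List.map_append]
    exact (List.map_congr_left (fun p hp => by simp [hk p hp])).trans (List.map_id _)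

theorem pv_main (elements : List (List (String × String))) (rule_type : String) :
    group_elements_by_rule_py elements rule_type = group_elements_by_rule_py_alt elements rule_type := by
  have hfold :
      (elements.foldl (fun grouped elem =>
        let element_id := (pvLookup elem "element_id").getD ""
        let level_id := (pvLookup elem "level_id").getD ""
        let zone_id := (pvLookup elem "zone_id").getD ""
        let group_key :=
          if rule_type == "BY_LEVEL" then
            (if level_id == "" then "level:unknown" else "level:" ++ level_id)
          else if rule_type == "BY_ZONE" then
            (if zone_id == "" then "zone:unknown" else "zone:" ++ zone_id)
          else if rule_type == "BY_LEVEL_AND_ZONE" then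
            (if level_id == "" || zone_id == "" then "unknown" else "level:" ++ level_id ++ "_zone:" ++ zone_id)
          else "default"
        let g := if grouped.contains group_key then grouped else grouped.insert group_key []
        g.modify group_key [] (fun l => l ++ [element_id])) PySem.Dict.empty)
      = ((elements.map (fun e => (pvKeyOf rule_type e, (pvLookup e "element_id").getD ""))).foldl
          (fun d p => d.modify p.1 [] (fun l => l ++ [p.2])) PySem.Dict.empty) := by
    rw [List.foldl_map]
    congr 1
    funext d e
    exact pv_step_eq d (pvKeyOf rule_type e) ((pvLookup e "element_id").getD "")
  show (_ : PySem.Dict String (List String)).items = _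
  rw [hfold]
  set pairs := elements.map (fun e => (pvKeyOf rule_type e, (pvLookup e "element_id").getD "")) with hp
  have hnd : ((pairs.foldl (fun d p => d.modify p.1 [] (fun l => l ++ [p.2])) PySem.Dict.empty)).keys.Nodup :=
    PySem.Dict.nodup_keys_foldl_modify_key pairs Prod.fst [] (fun _ p => (fun l => l ++ [p.2])) PySem.Dict.empty PySem.Dict.nodup_keys_empty
  rw [PySem.Dict.items_eq_map_keys _ hnd []]
  rw [PySem.Dict.keys_foldl_modify_key pairs Prod.fst [] (fun _ p => (fun l => l ++ [p.2])) PySem.Dict.empty]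
  show _ = (PySem.List.dedup (pairs.map Prod.fst)).map _
  rw [PySem.List.dedup_eq_ofList]
  rw [PySem.Dict.keys_empty]
  show (PySem.Set.ofList (pairs.map Prod.fst)).map _ = _
  apply List.map_congr_left
  intro k _
  rw [PySem.Dict.getD_foldl_modify_append pairs PySem.Dict.empty k]
  rw [← hp]
  rfl

-- ===== VERDICT (by name: the statement is the Claim_ definition above) =====
theorem group_elements_by_rule_py_spec : Claim_equal_group_elements_by_rule_py := by
  intro elements rule_type _ _
  exact pv_main elements rule_type
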